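-- pv_equiv track=rewrite | github.com/erturkmemmedli/Hacker-Rank-Solutions | Algorithms/Implementation/organizingContainers.py | organizingContainers
-- ===== SOURCE A (Python) =====
-- def organizingContainers(container):
--     # Write your code here
--     availability = []
--     types = [0] * len(container[0])
--
--     for c in container:
--         s = 0
--         for i in range(len(c)):
--             types[i] += c[i]
--             s += c[i]
--         availability.append(s)
--
--     return "Possible" if sorted(availability) == sorted(types) else "Impossible"
-- ===== SOURCE B (Python) =====
-- def organizingContainers(container):
--     balance = {}
--     cols = {}
--     for c in container:
--         s = sum(c)
--         balance[s] = balance.get(s, 0) + 1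
--         for i, x in enumerate(c):
--             cols[i] = cols.get(i, 0) + x
--     for t in cols.values():
--         balance[t] = balance.get(t, 0) - 1
--     return "Possible" if all(v == 0 for v in balance.values()) else "Impossible"
-- ===== Notes on version B (the rewrite author's own statement) =====
-- stated objective: alternative
-- what changed: Instead of A's sort-and-compare of a row-sum list against a mutated column-totals array, B checks multiset equality with dictionaries: a counter keyed by row sum is incremented per row, column totals are accumulated in a dict keyed by column index via enumerate, each column total then decrements the counter, and the answer is Possible iff every counter value is zero; no sorting at all.
import Mathlib
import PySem

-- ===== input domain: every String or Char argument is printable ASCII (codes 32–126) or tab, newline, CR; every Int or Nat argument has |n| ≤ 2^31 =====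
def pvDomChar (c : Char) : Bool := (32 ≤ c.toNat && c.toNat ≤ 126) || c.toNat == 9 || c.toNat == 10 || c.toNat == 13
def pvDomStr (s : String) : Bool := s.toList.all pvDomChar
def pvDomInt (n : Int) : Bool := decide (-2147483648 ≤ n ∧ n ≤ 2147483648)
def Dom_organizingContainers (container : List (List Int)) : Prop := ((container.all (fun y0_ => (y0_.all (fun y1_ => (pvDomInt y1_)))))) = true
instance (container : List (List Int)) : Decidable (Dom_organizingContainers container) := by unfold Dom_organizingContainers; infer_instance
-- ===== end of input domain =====

-- B drops A's sort-and-compare of row sums vs a mutated column-totals array, and instead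
-- balances a dict counter: +1 per row sum, -1 per column total (a dict built via enumerate),
-- answering "Possible" iff every count is zero. Return value only; no observable mutation.

-- ===== PORT A =====
-- reading row 0 of an empty container raises; ported totally via headD (excluded by Pre_).
def organizingContainers (container : List (List Int)) : String :=
  let types0 : List Int := List.replicate (container.headD []).length 0
  let r := container.foldl
    (fun (acc : List Int × List Int) c =>
      let p := (PySem.List.pyRange 0 c.length 1).foldl
        (fun (st : List Int × Int) i =>
          (PySem.List.pySetD st.1 i (PySem.List.pyGetD st.1 i 0 + PySem.List.pyGetD c i 0),
           st.2 + PySem.List.pyGetD c i 0))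
        (acc.2, 0)
      (acc.1 ++ [p.2], p.1))
    ([], types0)
  if PySem.List.sorted r.1 (fun x => x) false = PySem.List.sorted r.2 (fun x => x) false
  then "Possible" else "Impossible"

-- ===== PORT B =====
def organizingContainers_alt (container : List (List Int)) : String :=
  let st := container.foldl
    (fun (acc : PySem.Dict Int Int × PySem.Dict Int Int) c =>
      let s := c.sum
      let balance := acc.1.insert s (acc.1.getD s 0 + 1)
      let cols := (PySem.List.enumerate c 0).foldl
        (fun (d : PySem.Dict Int Int) p => d.insert p.1 (d.getD p.1 0 + p.2)) acc.2
      (balance, cols))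
    (PySem.Dict.empty, PySem.Dict.empty)
  let balance := st.2.values.foldl
    (fun (b : PySem.Dict Int Int) t => b.insert t (b.getD t 0 - 1)) st.1
  if balance.values.all (fun v => v == 0) then "Possible" else "Impossible"

-- ===== PRECONDITION & SPEC =====
-- Pre_ is exactly where A returns: A raises IndexError on an empty container (it reads row 0)
-- and whenever some row is longer than row 0 (the column-totals write goes out of range).
def Pre_organizingContainers (container : List (List Int)) : Prop :=
  container ≠ [] ∧ ∀ c ∈ container, c.length ≤ (container.headD []).length
instance (container : List (List Int)) : Decidable (Pre_organizingContainers container) := by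
  unfold Pre_organizingContainers; infer_instance

def pvWitness_organizingContainers : List (List Int) := [[1, 3], [2, 2]]

def Spec_organizingContainers (container : List (List Int)) (out : String) : Prop := out = organizingContainers_alt container
instance (container : List (List Int)) (out : String) : Decidable (Spec_organizingContainers container out) := by unfold Spec_organizingContainers; infer_instance

-- ===== CLAIM (what is proved, stated in full; the proofs are below) =====
def Claim_equal_organizingContainers : Prop := ∀ (container : List (List Int)), Dom_organizingContainers container → Pre_organizingContainers container → Spec_organizingContainers container (organizingContainers container)

-- ===== LEMMAS AND PROOFS =====

-- the body of A's outer loop, named so the induction can rewrite it cleanly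
def pvStep (acc : List Int × List Int) (c : List Int) : List Int × List Int :=
  let p := (PySem.List.pyRange 0 c.length 1).foldl
    (fun (st : List Int × Int) i =>
      (PySem.List.pySetD st.1 i (PySem.List.pyGetD st.1 i 0 + PySem.List.pyGetD c i 0),
       st.2 + PySem.List.pyGetD c i 0))
    (acc.2, 0)
  (acc.1 ++ [p.2], p.1)

theorem pvStep_eq (acc : List Int × List Int) (c : List Int) :
    pvStep acc c
      = (acc.1 ++ [(PySem.List.pyRange 0 c.length 1).foldl (fun (t : Int) i => t + PySem.List.pyGetD c i 0) 0],
         (PySem.List.pyRange 0 c.length 1).foldl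
           (fun (t : List Int) i => PySem.List.pySetD t i (PySem.List.pyGetD t i 0 + PySem.List.pyGetD c i 0)) acc.2) := by
  unfold pvStep
  rw [PySem.List.foldl_prod_mk
    (f := fun (t : List Int) (i : Int) => PySem.List.pySetD t i (PySem.List.pyGetD t i 0 + PySem.List.pyGetD c i 0))
    (g := fun (t : Int) (i : Int) => t + PySem.List.pyGetD c i 0)]

-- A's inner loop, second component: the running row sum is sum c
theorem pvInnerSnd (c : List Int) (s : Int) :
    (PySem.List.pyRange 0 c.length 1).foldl (fun (t : Int) i => t + PySem.List.pyGetD c i 0) s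
      = s + c.sum := by
  rw [PySem.List.foldl_pyRange_zero_pyGetD' c 0 (fun t x => t + x) s, PySem.List.foldl_add]
  simp

-- A's inner loop, first component: length is preserved
theorem pvInnerFstLen (c ty : List Int) (m : ℕ) :
    ((PySem.List.pyRange 0 m 1).foldl
      (fun (t : List Int) i => PySem.List.pySetD t i (PySem.List.pyGetD t i 0 + PySem.List.pyGetD c i 0)) ty).length
      = ty.length := by
  induction m generalizing ty with
  | zero => simp
  | succ n ih =>
      rw [show ((n + 1 : ℕ) : Int) = (n : Int) + 1 from by push_cast; ring,
          PySem.List.pyRange_one_succ_right (by positivity), List.foldl_append]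
      simp [ih]

-- A's inner loop, first component, elementwise: entry j gains c[j] iff j < m (m ≤ ty.length)
theorem pvInnerFstGet (c ty : List Int) (m j : ℕ) (hm : m ≤ ty.length) :
    ((PySem.List.pyRange 0 m 1).foldl
      (fun (t : List Int) i => PySem.List.pySetD t i (PySem.List.pyGetD t i 0 + PySem.List.pyGetD c i 0)) ty).getD j 0
      = ty.getD j 0 + (if j < m then PySem.List.pyGetD c (j : Int) 0 else 0) := by
  induction m generalizing j with
  | zero => simp
  | succ n ih =>
      rw [show ((n + 1 : ℕ) : Int) = (n : Int) + 1 from by push_cast; ring,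
          PySem.List.pyRange_one_succ_right (by positivity), List.foldl_append]
      simp only [List.foldl_cons, List.foldl_nil]
      have hlen := pvInnerFstLen c ty n
      have hn : n < ty.length := Nat.lt_of_lt_of_le (Nat.lt_succ_self n) hm
      rw [PySem.List.pySetD_natCast]
      by_cases hj : j = n
      · subst hj
        rw [List.getD_eq_getElem?_getD, List.getElem?_set_self (by omega), Option.getD_some,
            PySem.List.pyGetD_natCast, ih j (Nat.le_of_succ_le hm)]
        simp
      · rw [List.getD_eq_getElem?_getD, List.getElem?_set_ne (by omega),
            ← List.getD_eq_getElem?_getD, ih j (Nat.le_of_succ_le hm)]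
        by_cases h1 : j < n
        · simp [h1, show j < n + 1 by omega]
        · have h2 : ¬ j < n + 1 := by omega
          simp [h1, h2]

-- A's outer loop: availability collects row sums; column totals accumulate elementwise
theorem pvOuter (rows : List (List Int)) (av ty : List Int)
    (h : ∀ c ∈ rows, c.length ≤ ty.length) :
    (rows.foldl pvStep (av, ty)).1 = av ++ rows.map List.sum
    ∧ (rows.foldl pvStep (av, ty)).2.length = ty.length
    ∧ ∀ j : ℕ, (rows.foldl pvStep (av, ty)).2.getD j 0
      = ty.getD j 0 + (rows.map (fun c => if j < c.length then PySem.List.pyGetD c (j : Int) 0 else 0)).sum := by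
  induction rows generalizing av ty with
  | nil => simp
  | cons c rows ih =>
      have hc : c.length ≤ ty.length := h c (by simp)
      rw [List.foldl_cons, pvStep_eq]
      obtain ⟨ih1, ih2, ih3⟩ := ih
        (av ++ [(PySem.List.pyRange 0 c.length 1).foldl (fun (t : Int) i => t + PySem.List.pyGetD c i 0) 0])
        ((PySem.List.pyRange 0 c.length 1).foldl
          (fun (t : List Int) i => PySem.List.pySetD t i (PySem.List.pyGetD t i 0 + PySem.List.pyGetD c i 0)) ty)
        (by intro d hd; rw [pvInnerFstLen]; exact h d (by simp [hd]))
      refine ⟨?_, ?_, ?_⟩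
      · rw [ih1, pvInnerSnd]
        simp
      · rw [ih2, pvInnerFstLen]
      · intro j
        rw [ih3, pvInnerFstGet c ty c.length j hc]
        simp [add_assoc]

-- ===== B-side lemmas =====

-- the column-dict update for one row: entry k gains c[k-s] iff k indexes the enumerated row
theorem pvColRow (c : List Int) (s : ℕ) (d : PySem.Dict Int Int) (k : ℕ) :
    ((PySem.List.enumerate c (s : Int)).foldl
      (fun (d : PySem.Dict Int Int) p => d.insert p.1 (d.getD p.1 0 + p.2)) d).getD (k : Int) 0
      = d.getD (k : Int) 0 + (if s ≤ k ∧ k < s + c.length then c.getD (k - s) 0 else 0) := by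
  induction c generalizing s d with
  | nil => simp
  | cons x xs ih =>
      rw [PySem.List.enumerate_cons, List.foldl_cons,
          show (s : Int) + 1 = ((s + 1 : ℕ) : Int) from by push_cast; ring, ih]
      dsimp only
      by_cases hk : k = s
      · subst hk
        rw [PySem.Dict.getD_insert_self]
        simp [show ¬ (k + 1 ≤ k) from by omega]
      · rw [PySem.Dict.getD_insert_of_ne _ _ _ (show (k:Int) ≠ (s:Int) by exact_mod_cast hk)]
        by_cases h1 : s + 1 ≤ k ∧ k < s + 1 + xs.length
        · have h2 : s ≤ k ∧ k < s + (x :: xs).length := by simp; omega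
          have h3 : k - s = (k - (s + 1)) + 1 := by omega
          simp only [h1, h2, h3, List.getD_cons_succ]
        · have h2 : ¬ (s ≤ k ∧ k < s + (x :: xs).length) := by
            simp only [List.length_cons]; omega
          rw [if_neg h1, if_neg h2]

-- the column dict over all rows: entry k is the k-th column total
theorem pvColsAll (rows : List (List Int)) (d : PySem.Dict Int Int) (k : ℕ) :
    (rows.foldl
      (fun (d : PySem.Dict Int Int) c => (PySem.List.enumerate c 0).foldl
        (fun (d : PySem.Dict Int Int) p => d.insert p.1 (d.getD p.1 0 + p.2)) d) d).getD (k : Int) 0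
      = d.getD (k : Int) 0 + (rows.map (fun c => if k < c.length then c.getD k 0 else 0)).sum := by
  induction rows generalizing d with
  | nil => simp
  | cons c rows ih =>
      rw [List.foldl_cons, ih]
      have h0 := pvColRow c 0 d k
      simp only [Nat.cast_zero, Nat.sub_zero, Nat.zero_add, Nat.zero_le, true_and] at h0
      rw [h0]
      simp [add_assoc]

-- the column dict's keys: each row only touches keys 0..len(c)-1
theorem pvColsKeysSub (rows : List (List Int)) (d : PySem.Dict Int Int)
    (h : ∀ c ∈ rows, ∀ j : Int, 0 ≤ j → j < (c.length : Int) → j ∈ d.keys) :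
    (rows.foldl
      (fun (d : PySem.Dict Int Int) c => (PySem.List.enumerate c 0).foldl
        (fun (d : PySem.Dict Int Int) p => d.insert p.1 (d.getD p.1 0 + p.2)) d) d).keys = d.keys := by
  induction rows generalizing d with
  | nil => rfl
  | cons c rows ih =>
      rw [List.foldl_cons]
      have hk : ((PySem.List.enumerate c 0).foldl
          (fun (d : PySem.Dict Int Int) p => d.insert p.1 (d.getD p.1 0 + p.2)) d).keys = d.keys := by
        rw [PySem.Dict.keys_foldl_insert_key (key := fun p : Int × Int => p.1)
              (f := fun (d : PySem.Dict Int Int) p => d.getD p.1 0 + p.2),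
            PySem.List.map_fst_enumerate, PySem.Set.update_eq_append_filter]
        have : ((PySem.Set.ofList (PySem.List.pyRange 0 (0 + (c.length : Int)) 1)).filter
            (fun y => !(PySem.Set.contains d.keys y))) = [] := by
          rw [List.filter_eq_nil_iff]
          intro a ha
          have ha' : a ∈ PySem.List.pyRange 0 (0 + (c.length : Int)) 1 := (PySem.Set.mem_ofList _ _).mp ha
          rw [PySem.List.mem_pyRange_one] at ha'
          have : a ∈ d.keys := h c (by simp) a ha'.1 (by omega)
          simpa using this
        rw [this, List.append_nil]
      have hsub : ∀ c' ∈ rows, ∀ j : Int, 0 ≤ j → j < (c'.length : Int) →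
          j ∈ ((PySem.List.enumerate c 0).foldl
            (fun (d : PySem.Dict Int Int) p => d.insert p.1 (d.getD p.1 0 + p.2)) d).keys := by
        intro c' hc' j h0 h1
        rw [hk]
        exact h c' (by simp [hc']) j h0 h1
      rw [ih _ hsub, hk]

-- the balance dict after decrements: entry v holds (#rows with sum v) − (#column totals = v)
theorem pvGetDSub (l : List Int) (d : PySem.Dict Int Int) (v : Int) :
    (l.foldl (fun (b : PySem.Dict Int Int) t => b.insert t (b.getD t 0 - 1)) d).getD v 0
      = d.getD v 0 - l.count v := by
  induction l generalizing d with
  | nil => simp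
  | cons x xs ih =>
      rw [List.foldl_cons, ih]
      by_cases hv : v = x
      · subst hv
        rw [PySem.Dict.getD_insert_self, List.count_cons_self]
        push_cast; ring
      · rw [PySem.Dict.getD_insert_of_ne _ _ _ hv]
        have hv' : ¬ x = v := fun h => hv h.symm
        simp [hv']

-- stable-sort equality is multiset equality (key = identity on Int)
theorem pvSortedEqIffPerm (xs ys : List Int) :
    PySem.List.sorted xs (fun x => x) false = PySem.List.sorted ys (fun x => x) false ↔ xs.Perm ys := by
  constructor
  · intro h
    exact ((PySem.List.sorted_perm xs (fun x => x) false).symm.trans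
      (h ▸ PySem.List.sorted_perm ys (fun x => x) false))
  · intro h
    refine PySem.List.sorted_id_eq_of_perm_of_pairwise _ _
      ((PySem.List.sorted_perm ys (fun x => x) false).trans h.symm) ?_
    exact PySem.List.sorted_pairwise ys (fun x => x)

-- ===== VERDICT (by name: the statement is the Claim_ definition above) =====
theorem organizingContainers_spec : Claim_equal_organizingContainers := by
  intro container _ hpre
  obtain ⟨hne, hlen⟩ := hpre
  show organizingContainers container = organizingContainers_alt container
  unfold organizingContainers organizingContainers_alt
  set w := (container.headD []).length with hw
  -- A side: name the loop body and split it
  have hfunA : (fun (acc : List Int × List Int) c =>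
      let p := (PySem.List.pyRange 0 c.length 1).foldl
        (fun (st : List Int × Int) i =>
          (PySem.List.pySetD st.1 i (PySem.List.pyGetD st.1 i 0 + PySem.List.pyGetD c i 0),
           st.2 + PySem.List.pyGetD c i 0))
        (acc.2, 0)
      (acc.1 ++ [p.2], p.1)) = pvStep := rfl
  rw [hfunA]
  obtain ⟨h1, h2, h3⟩ := pvOuter container [] (List.replicate w 0)
    (by intro c hc; simpa using hlen c hc)
  -- B side: the fused fold is two independent folds
  have hfunB : (fun (acc : PySem.Dict Int Int × PySem.Dict Int Int) (c : List Int) =>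
      let s := c.sum
      let balance := acc.1.insert s (acc.1.getD s 0 + 1)
      let cols := (PySem.List.enumerate c 0).foldl
        (fun (d : PySem.Dict Int Int) p => d.insert p.1 (d.getD p.1 0 + p.2)) acc.2
      (balance, cols))
      = (fun (acc : PySem.Dict Int Int × PySem.Dict Int Int) (c : List Int) =>
          (acc.1.insert c.sum (acc.1.getD c.sum 0 + 1),
           (PySem.List.enumerate c 0).foldl
             (fun (d : PySem.Dict Int Int) p => d.insert p.1 (d.getD p.1 0 + p.2)) acc.2)) := rfl
  rw [hfunB, PySem.List.foldl_prod_mk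
    (f := fun (b : PySem.Dict Int Int) (c : List Int) => b.insert c.sum (b.getD c.sum 0 + 1))
    (g := fun (d : PySem.Dict Int Int) (c : List Int) => (PySem.List.enumerate c 0).foldl
      (fun (d : PySem.Dict Int Int) p => d.insert p.1 (d.getD p.1 0 + p.2)) d)]
  -- the balance counter after the first phase
  have hbal1 : container.foldl
      (fun (b : PySem.Dict Int Int) (c : List Int) => b.insert c.sum (b.getD c.sum 0 + 1))
      PySem.Dict.empty = PySem.Dict.counter (container.map List.sum) := by
    rw [← PySem.Dict.foldl_insert_getD_add_one_eq_counter, List.foldl_map]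
  -- the column dict: its keys are exactly 0..w-1
  obtain ⟨c0, rest, rfl⟩ := List.exists_cons_of_ne_nil hne
  have hw0 : w = c0.length := by rw [hw]; rfl
  have hkey1 : ((PySem.List.enumerate c0 0).foldl
      (fun (d : PySem.Dict Int Int) p => d.insert p.1 (d.getD p.1 0 + p.2))
      PySem.Dict.empty).keys = PySem.List.pyRange 0 (w : Int) 1 := by
    rw [PySem.Dict.keys_foldl_insert_key (key := fun p : Int × Int => p.1)
          (f := fun (d : PySem.Dict Int Int) p => d.getD p.1 0 + p.2),
        PySem.List.map_fst_enumerate, PySem.Dict.keys_empty]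
    have : (0 : Int) + (c0.length : Int) = ((w : ℕ) : Int) := by rw [hw0]; ring
    rw [this, PySem.Set.update_nil_left, PySem.Set.ofList_eq_self_of_nodup _ (PySem.List.nodup_pyRange_one _ _)]
  have hkeys : ((c0 :: rest).foldl
      (fun (d : PySem.Dict Int Int) (c : List Int) => (PySem.List.enumerate c 0).foldl
        (fun (d : PySem.Dict Int Int) p => d.insert p.1 (d.getD p.1 0 + p.2)) d)
      PySem.Dict.empty).keys = PySem.List.pyRange 0 (w : Int) 1 := by
    rw [List.foldl_cons, pvColsKeysSub, hkey1]
    intro c hc j h0 hj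
    rw [hkey1, PySem.List.mem_pyRange_one]
    have : c.length ≤ w := hlen c (by simp [hc])
    exact ⟨h0, by omega⟩
  -- both type-total lists are the canonical column-sum list
  set rows := c0 :: rest with hrows
  set T : List Int := (List.range w).map
    (fun j => (rows.map (fun c => if j < c.length then c.getD j 0 else 0)).sum) with hT
  have hvals : (rows.foldl
      (fun (d : PySem.Dict Int Int) (c : List Int) => (PySem.List.enumerate c 0).foldl
        (fun (d : PySem.Dict Int Int) p => d.insert p.1 (d.getD p.1 0 + p.2)) d)
      PySem.Dict.empty).values = T := by
    rw [PySem.Dict.values_eq_map_keys _ (by rw [hkeys]; exact PySem.List.nodup_pyRange_one _ _) 0,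
        hkeys, PySem.List.pyRange_one]
    simp only [Int.sub_zero, Int.toNat_natCast, List.map_map]
    rw [hT]
    refine List.map_congr_left ?_
    intro k hk
    have := pvColsAll rows PySem.Dict.empty k
    simp only [PySem.Dict.getD_empty, zero_add] at this
    simpa using this
  have htyA : (rows.foldl pvStep ([], List.replicate w 0)).2 = T := by
    apply List.ext_getElem
    · rw [h2, hT]; simp
    · intro j hj hj'
      have hjw : j < w := by rw [h2] at hj; simpa using hj
      have hgd : (rows.foldl pvStep ([], List.replicate w 0)).2[j]'hj
          = (rows.foldl pvStep ([], List.replicate w 0)).2.getD j 0 := by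
        rw [List.getD_eq_getElem?_getD, List.getElem?_eq_getElem hj, Option.getD_some]
      rw [hgd, h3 j]
      simp [hT, hjw]
  -- the decremented balance dict is zero everywhere iff the two multisets agree
  set avail := rows.map List.sum with havail
  set bal2 := T.foldl (fun (b : PySem.Dict Int Int) t => b.insert t (b.getD t 0 - 1))
    (PySem.Dict.counter avail) with hbal2
  have hgd2 : ∀ v, bal2.getD v 0 = (avail.count v : Int) - (T.count v : Int) := by
    intro v
    rw [hbal2, pvGetDSub, PySem.Dict.getD_counter]
  have hk2 : bal2.keys = PySem.Set.update (PySem.Set.ofList avail) T := by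
    rw [hbal2, PySem.Dict.keys_foldl_insert (f := fun (b : PySem.Dict Int Int) t => b.getD t 0 - 1),
        PySem.Dict.keys_counter]
  have hnd2 : bal2.keys.Nodup := by
    rw [hbal2]
    exact PySem.Dict.nodup_keys_foldl_insert _ _ _
      (by rw [PySem.Dict.keys_counter]; exact PySem.Set.nodup_ofList _)
  have hiff : (PySem.List.sorted avail (fun x => x) false = PySem.List.sorted T (fun x => x) false)
      ↔ (bal2.values.all (fun v => v == 0) = true) := by
    rw [pvSortedEqIffPerm, List.perm_iff_count,
        PySem.Dict.values_eq_map_keys bal2 hnd2 0, List.all_map, List.all_eq_true]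
    constructor
    · intro hcnt k _
      simp only [Function.comp_apply, beq_iff_eq, hgd2 k, hcnt k, sub_self]
    · intro hall v
      by_cases hv : v ∈ bal2.keys
      · have := hall v hv
        simp only [Function.comp_apply, beq_iff_eq, hgd2 v, sub_eq_zero] at this
        exact_mod_cast this
      · have hva : v ∉ avail := fun hmem => hv (by
          rw [hk2]; exact (PySem.Set.mem_update _ _ _).mpr (Or.inl ((PySem.Set.mem_ofList _ _).mpr hmem)))
        have hvt : v ∉ T := fun hmem => hv (by
          rw [hk2]; exact (PySem.Set.mem_update _ _ _).mpr (Or.inr hmem))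
        rw [List.count_eq_zero.mpr hva, List.count_eq_zero.mpr hvt]
  -- assemble
  dsimp only
  rw [hbal1, hvals, h1, List.nil_append, ← hbal2, htyA]
  by_cases hc : PySem.List.sorted avail (fun x => x) false = PySem.List.sorted T (fun x => x) false
  · rw [if_pos hc, if_pos (hiff.mp hc)]
  · rw [if_neg hc, if_neg (fun hb => hc (hiff.mpr hb))]
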